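-- pv_equiv track=rewrite | github.com/stepanyanprod-creator/finance-bot | app/middleware.py | validate_user_input
-- ===== SOURCE A (Python) =====
-- def validate_user_input(text: str, max_length: int = 1000) -> bool:
--     """Валидация пользовательского ввода"""
--     if not text or len(text.strip()) == 0:
--         return False
--
--     if len(text) > max_length:
--         return False
--
--     # Проверка на потенциально опасные символы
--     dangerous_chars = ['<', '>', '&', '"', "'", '\\', '/', ';', '|', '`']
--     if any(char in text for char in dangerous_chars):
--         return False
--
--     return True
-- ===== SOURCE B (Python) =====
-- def validate_user_input(text: str, max_length: int = 1000) -> bool: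
--     """Validate user input in a single fused pass: one loop accumulates the
--     length, whether any non-whitespace character exists, and whether any
--     dangerous character occurs; the verdict is one boolean combination."""
--     n = 0
--     has_content = False
--     has_danger = False
--     for ch in text:
--         n += 1
--         if not ch.isspace():
--             has_content = True
--         if ch in '<>&"\'\\/;|`':
--             has_danger = True
--     return has_content and n <= max_length and not has_danger
-- ===== Notes on version B (the rewrite author's own statement) =====
-- stated objective: alternative
-- what changed: A's three staged checks (strip-based emptiness test, length test, then a ten-pass blacklist scan with early returns) are replaced by a single fused loop over the text that accumulates length, a non-whitespace flag and a dangerous-char flag, combined in one final boolean expression.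
import Mathlib
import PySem

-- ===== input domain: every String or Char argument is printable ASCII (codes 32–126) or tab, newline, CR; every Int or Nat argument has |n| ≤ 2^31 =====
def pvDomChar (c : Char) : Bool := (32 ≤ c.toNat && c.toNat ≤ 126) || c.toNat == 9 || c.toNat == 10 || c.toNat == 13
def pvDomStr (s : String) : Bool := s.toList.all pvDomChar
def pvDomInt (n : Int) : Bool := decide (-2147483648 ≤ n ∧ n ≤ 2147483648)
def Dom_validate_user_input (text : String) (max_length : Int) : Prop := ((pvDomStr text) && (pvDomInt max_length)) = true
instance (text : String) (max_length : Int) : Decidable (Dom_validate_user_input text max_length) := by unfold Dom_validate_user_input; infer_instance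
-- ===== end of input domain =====

-- B fuses A's three staged checks into one loop over the text accumulating
-- (length, has-content, has-danger); alternative decomposition, same results.

-- ===== PORT A =====
def dangerousCharsA : List Char := ['<', '>', '&', '"', '\'', '\\', '/', ';', '|', '`']

def validate_user_input (text : String) (max_length : Int) : Bool :=
  if text == "" || PySem.Str.len (PySem.Str.strip text) == 0 then false
  else if PySem.Str.len text > max_length then false
  else if dangerousCharsA.any (fun c => text.toList.contains c) then false
  else true

-- ===== PORT B =====
def dangerousStrB : List Char := "<>&\"'\\/;|`".toList

def validate_user_input_alt (text : String) (max_length : Int) : Bool :=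
  let st := text.toList.foldl
    (fun (acc : Int × Bool × Bool) ch =>
      (acc.1 + 1,
       acc.2.1 || !(PySem.Chars.isspace ch),
       acc.2.2 || dangerousStrB.contains ch))
    (0, false, false)
  st.2.1 && decide (st.1 ≤ max_length) && !st.2.2

-- ===== PRECONDITION & SPEC =====
def Spec_validate_user_input (text : String) (max_length : Int) (out : Bool) : Prop := out = validate_user_input_alt text max_length
instance (text : String) (max_length : Int) (out : Bool) : Decidable (Spec_validate_user_input text max_length out) := by unfold Spec_validate_user_input; infer_instance

-- ===== CLAIM (what is proved, stated in full; the proofs are below) =====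
def Claim_equal_validate_user_input : Prop := ∀ (text : String) (max_length : Int), Dom_validate_user_input text max_length → Spec_validate_user_input text max_length (validate_user_input text max_length)

-- ===== LEMMAS AND PROOFS =====

-- B's fused fold, characterised: it computes the length and the two flags.
theorem foldB_eq (l : List Char) (n : Int) (a b : Bool) :
    l.foldl
      (fun (acc : Int × Bool × Bool) ch =>
        (acc.1 + 1,
         acc.2.1 || !(PySem.Chars.isspace ch),
         acc.2.2 || dangerousStrB.contains ch))
      (n, a, b)
    = (n + l.length,
       a || l.any (fun c => !(PySem.Chars.isspace c)),
       b || l.any (fun c => dangerousStrB.contains c)) := by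
  induction l generalizing n a b with
  | nil => simp
  | cons x xs ih =>
    simp only [List.foldl_cons, List.any_cons, ih, List.length_cons]
    refine Prod.ext ?_ (Prod.ext ?_ ?_)
    · simp; ring
    · simp [Bool.or_assoc]
    · simp [Bool.or_assoc]

-- A's strip-based emptiness test: strip s = [] iff every char is whitespace.
theorem strip_eq_nil_iff (s : List Char) :
    PySem.Chars.strip s = [] ↔ ∀ c ∈ s, PySem.Chars.isspace c := by
  simp only [PySem.Chars.strip, PySem.Chars.rstrip, PySem.Chars.lstrip,
    List.reverse_eq_nil_iff, List.dropWhile_eq_nil_iff, List.mem_reverse]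
  constructor
  · intro h c hc
    rw [← List.takeWhile_append_dropWhile (p := PySem.Chars.isspace) (l := s)] at hc
    rcases List.mem_append.1 hc with h1 | h1
    · exact List.mem_takeWhile_imp h1
    · exact h c h1
  · intro h c hc
    exact h c ((List.dropWhile_sublist _).subset hc)

-- A's ten-pass blacklist scan fires iff some char of the text is dangerous.
theorem scanA_eq_anyB (l : List Char) :
    dangerousCharsA.any (fun c => l.contains c)
      = l.any (fun c => dangerousStrB.contains c) := by
  rw [Bool.eq_iff_iff]
  simp only [List.any_eq_true, List.contains_eq_mem, decide_eq_true_eq]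
  have he : dangerousStrB = dangerousCharsA := by decide
  rw [he]
  constructor
  · rintro ⟨c, hcd, hct⟩; exact ⟨c, hct, hcd⟩
  · rintro ⟨c, hct, hcd⟩; exact ⟨c, hcd, hct⟩

-- ===== VERDICT (by name: the statement is the Claim_ definition above) =====
theorem validate_user_input_spec : Claim_equal_validate_user_input := by
  intro text max_length _
  unfold Spec_validate_user_input validate_user_input validate_user_input_alt
  rw [foldB_eq, scanA_eq_anyB]
  have hempty : (text == "" || PySem.Str.len (PySem.Str.strip text) == 0)
      = !(text.toList.any fun c => !(PySem.Chars.isspace c)) := by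
    rw [Bool.eq_iff_iff]
    simp only [Bool.or_eq_true, beq_iff_eq, PySem.Str.len_eq, PySem.Str.toList_strip,
      Bool.not_eq_true', List.any_eq_false, Bool.not_eq_false]
    constructor
    · intro h c hc
      rcases h with h | h
      · simp [h] at hc
      · have hz : (PySem.Chars.strip text.toList).length = 0 := by exact_mod_cast h
        exact (strip_eq_nil_iff _).1 (List.eq_nil_of_length_eq_zero hz) c hc
    · intro h
      right
      rw [(strip_eq_nil_iff _).2 h]
      rfl
  rw [hempty]
  simp only [PySem.Str.len_eq, zero_add]
  generalize text.toList.any (fun c => !(PySem.Chars.isspace c)) = q1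
  generalize text.toList.any (fun c => dangerousStrB.contains c) = q2
  cases q1 <;> cases q2 <;>
    by_cases hL : ((text.length : Int)) ≤ max_length <;>
    simp [hL] <;> omega
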